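-- pv_equiv track=rewrite | github.com/rodrigorahal/advent-of-code-2023 | 01/trebuchet.py | digits_with_cursive
-- ===== SOURCE A (Python) =====
-- NUMS = ["one", "two", "three", "four", "five", "six", "seven", "eight", "nine"]
--
-- def digits_with_cursive(words):
--     digits = []
--     for word in words:
--         word_digits = []
--         for i, char in enumerate(word):
--             for j, num in enumerate(NUMS):
--                 if word[i:].startswith(num):
--                     word_digits.append(str(j + 1))
--             if char.isdigit():
--                 word_digits.append(char)
--         digits.append(word_digits)
--     return digits
-- ===== SOURCE B (Python) =====
-- NUMS = ["one", "two", "three", "four", "five", "six", "seven", "eight", "nine"]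
--
-- def digits_with_cursive(words):
--     digits = []
--     for word in words:
--         pairs = []
--         for j, num in enumerate(NUMS):
--             start = 0
--             while True:
--                 idx = word.find(num, start)
--                 if idx == -1:
--                     break
--                 pairs.append((idx, str(j + 1)))
--                 start = idx + 1
--         for i, char in enumerate(word):
--             if char.isdigit():
--                 pairs.append((i, char))
--         pairs.sort(key=lambda p: p[0])
--         digits.append([v for _, v in pairs])
--     return digits
-- ===== Notes on version B (the rewrite author's own statement) =====
-- stated objective: faster
-- what changed: Instead of testing all nine number-words at every character position, B collects (position, value) pairs per number-word with repeated str.find (advancing the start by 1 to keep overlapping matches) plus one pass for digit characters, then sorts the pairs by position and emits the values in order.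
import Mathlib
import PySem

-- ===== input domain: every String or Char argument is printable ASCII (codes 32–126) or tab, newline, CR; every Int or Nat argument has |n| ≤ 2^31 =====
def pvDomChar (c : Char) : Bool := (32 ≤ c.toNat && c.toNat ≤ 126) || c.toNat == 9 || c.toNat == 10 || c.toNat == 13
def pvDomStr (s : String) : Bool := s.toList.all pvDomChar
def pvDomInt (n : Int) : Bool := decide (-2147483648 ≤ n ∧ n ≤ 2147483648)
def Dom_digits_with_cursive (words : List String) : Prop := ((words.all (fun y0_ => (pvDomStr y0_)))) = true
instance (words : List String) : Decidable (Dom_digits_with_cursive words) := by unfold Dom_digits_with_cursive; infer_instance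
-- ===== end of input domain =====

-- B gathers each number-word's occurrences with repeated str.find (advancing by 1) plus the digit characters,
-- then sorts the (position, value) pairs once, instead of A's testing all nine words at every position; objective: alternative.

-- ===== PORT A =====
def NUMS : List String := ["one", "two", "three", "four", "five", "six", "seven", "eight", "nine"]

def digits_with_cursive (words : List String) : List (List String) :=
  words.foldl (fun digits word =>
    digits ++ [(PySem.List.enumerate word.toList).foldl (fun wd ic =>
      let wd2 := (PySem.List.enumerate NUMS).foldl (fun acc jn =>
        if PySem.Str.startswith (PySem.Str.slice word (some ic.1) none) jn.2
        then acc ++ [PySem.Int.toStr (jn.1 + 1)] else acc) wd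
      if PySem.Chars.isdigit ic.2 then wd2 ++ [String.ofList [ic.2]] else wd2) []]) []

-- ===== PORT B =====
-- the `while True: idx = word.find(num, start) …` loop; fuel (len word + 1) only makes the recursion structural
def findPairsLoop (word num v : String) : Nat → Nat → List (Int × String) → List (Int × String)
  | 0, _, pairs => pairs
  | fuel+1, start, pairs =>
    let idx := PySem.Str.findFrom word num (start : Int)
    if idx = -1 then pairs
    else findPairsLoop word num v fuel (idx.toNat + 1) (pairs ++ [(idx, v)])

def digits_with_cursive_alt (words : List String) : List (List String) :=
  words.foldl (fun digits word =>
    let pairs0 := (PySem.List.enumerate NUMS).foldl (fun pairs jn =>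
        findPairsLoop word jn.2 (PySem.Int.toStr (jn.1 + 1)) (word.toList.length + 1) 0 pairs) []
    let pairs1 := (PySem.List.enumerate word.toList).foldl (fun pairs ic =>
        if PySem.Chars.isdigit ic.2 then pairs ++ [(ic.1, String.ofList [ic.2])] else pairs) pairs0
    let pairs := PySem.List.sorted pairs1 (fun p => p.1)
    digits ++ [pairs.map (fun p => p.2)]) []

-- ===== PRECONDITION & SPEC =====
def Spec_digits_with_cursive (words : List String) (out : List (List String)) : Prop := out = digits_with_cursive_alt words
instance (words : List String) (out : List (List String)) : Decidable (Spec_digits_with_cursive words out) := by unfold Spec_digits_with_cursive; infer_instance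

-- ===== CLAIM (what is proved, stated in full; the proofs are below) =====
def Claim_equal_digits_with_cursive : Prop := ∀ (words : List String), Dom_digits_with_cursive words → Spec_digits_with_cursive words (digits_with_cursive words)

-- ===== LEMMAS AND PROOFS =====

-- the value(s) A emits at position i of word (at most one, proved below)
def valsAt (word : String) (i : Nat) : List String :=
  ((PySem.List.enumerate NUMS).filter (fun jn =>
      PySem.Chars.startswith (word.toList.drop i) jn.2.toList)).map
    (fun jn => PySem.Int.toStr (jn.1 + 1)) ++
  (if PySem.Chars.isdigit (word.toList.getD i default)
   then [String.ofList [word.toList.getD i default]] else [])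

-- the canonical position-ordered (position, value) pair list of a word
def pairsC (word : String) : List (Int × String) :=
  (List.range word.toList.length).flatMap
    (fun i => (valsAt word i).map (fun v => ((i : Int), v)))

-- decide facts about the literal NUMS table
lemma nums_ne_nil : ∀ q ∈ PySem.List.enumerate NUMS, q.2.toList ≠ [] := by decide

set_option maxRecDepth 100000 in
lemma nums_no_prefix : (PySem.List.enumerate NUMS).Pairwise
    (fun a b => ¬ a.2.toList <+: b.2.toList ∧ ¬ b.2.toList <+: a.2.toList) := by decide

lemma nums_head_not_digit : ∀ q ∈ PySem.List.enumerate NUMS,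
    PySem.Chars.isdigit (q.2.toList.headD 'x') = false := by decide

-- flatMap of an if-singleton is map-over-filter
lemma flatMap_ite_eq_map_filter {α β : Type} (p : α → Bool) (f : α → β) (l : List α) :
    l.flatMap (fun x => if p x then [f x] else []) = (l.filter p).map f := by
  induction l with
  | nil => rfl
  | cons a l ih => by_cases h : p a <;> simp [List.flatMap_cons, h, ih]

lemma filter_length_le_one {α : Type} (p : α → Bool) (l : List α)
    (h : l.Pairwise (fun a b => ¬(p a = true ∧ p b = true))) : (l.filter p).length ≤ 1 := by
  induction l with
  | nil => simp
  | cons a l ih =>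
    rcases List.pairwise_cons.mp h with ⟨ha, hl⟩
    by_cases hpa : p a
    · have : l.filter p = [] := List.filter_eq_nil_iff.mpr (fun b hb hpb => ha b hb ⟨hpa, hpb⟩)
      simp [hpa, this]
    · simpa [List.filter_cons, hpa] using ih hl

lemma match_not_digit (word : String) (i : Nat) (jn : Int × String) (hmem : jn ∈ PySem.List.enumerate NUMS)
    (hsw : PySem.Chars.startswith (word.toList.drop i) jn.2.toList = true) :
    PySem.Chars.isdigit (word.toList.getD i default) = false := by
  have hpre : jn.2.toList <+: word.toList.drop i := (PySem.Chars.startswith_iff _ _).mp hsw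
  have hne : jn.2.toList ≠ [] := nums_ne_nil jn hmem
  obtain ⟨c, t, hct⟩ : ∃ c t, jn.2.toList = c :: t := by
    cases h : jn.2.toList with
    | nil => exact absurd h hne
    | cons c t => exact ⟨c, t, rfl⟩
  obtain ⟨rest, hrest⟩ := hpre
  rw [hct] at hrest
  have hhead : (word.toList.drop i).head? = some c := by rw [← hrest]; rfl
  rw [List.head?_drop] at hhead
  have hgd : word.toList.getD i default = c := by
    rw [List.getD_eq_getElem?_getD, hhead]; rfl
  have h2 := nums_head_not_digit jn hmem
  rw [hct] at h2
  rw [hgd]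
  simpa using h2

lemma valsAt_length (word : String) (i : Nat) :
    (valsAt word i).length ≤ 1 := by
  have hpair : (PySem.List.enumerate NUMS).Pairwise (fun a b =>
      ¬((PySem.Chars.startswith (word.toList.drop i) a.2.toList) = true ∧
        (PySem.Chars.startswith (word.toList.drop i) b.2.toList) = true)) := by
    refine nums_no_prefix.imp ?_
    rintro a b ⟨h1, h2⟩ ⟨ha, hb⟩
    rcases List.prefix_or_prefix_of_prefix ((PySem.Chars.startswith_iff _ _).mp ha)
        ((PySem.Chars.startswith_iff _ _).mp hb) with h | h
    · exact h1 h
    · exact h2 h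
  have hF := filter_length_le_one _ _ hpair
  by_cases hd : PySem.Chars.isdigit (word.toList.getD i default)
  · have hnil : (PySem.List.enumerate NUMS).filter (fun jn =>
        PySem.Chars.startswith (word.toList.drop i) jn.2.toList) = [] := by
      refine List.filter_eq_nil_iff.mpr ?_
      intro jn hmem hsw
      have hmd := match_not_digit word i jn hmem hsw
      rw [hmd] at hd
      exact Bool.false_ne_true hd
    simp only [valsAt, hnil, List.map_nil, List.nil_append]
    split <;> simp
  · have hite : (if PySem.Chars.isdigit (word.toList.getD i default)
        then [String.ofList [word.toList.getD i default]] else []) = [] := if_neg hd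
    simp only [valsAt, hite, List.append_nil, List.length_map]
    exact hF

lemma perm_flatMap_append {α β : Type} (l : List α) (f g : α → List β) :
    (l.flatMap (fun x => f x ++ g x)).Perm (l.flatMap f ++ l.flatMap g) := by
  induction l with
  | nil => simp
  | cons a l ih =>
    simp only [List.flatMap_cons, List.append_assoc]
    exact List.Perm.append_left (f a)
      ((List.Perm.append_left (g a) ih).trans (List.perm_append_comm_assoc _ _ _))

lemma flatMap_comm_perm {α β γ : Type} (l : List α) (m : List β) (f : α → β → List γ) :
    (l.flatMap (fun a => m.flatMap (f a))).Perm (m.flatMap (fun b => l.flatMap (fun a => f a b))) := by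
  induction l with
  | nil => simp
  | cons a l ih =>
    simp only [List.flatMap_cons]
    exact (List.Perm.append_left _ ih).trans (perm_flatMap_append m (f a) _).symm

-- characterisation of the find loop: all match positions from `start`, in order
lemma findPairsLoop_spec (word num v : String) (hnum : num.toList ≠ []) :
    ∀ (fuel start : Nat) (pairs : List (Int × String)),
      start ≤ word.toList.length → word.toList.length - start < fuel →
      findPairsLoop word num v fuel start pairs =
        pairs ++ ((List.range' start (word.toList.length - start)).filter
            (fun i => PySem.Chars.startswith (word.toList.drop i) num.toList)).map
          (fun (i : Nat) => ((i : Int), v)) := by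
  intro fuel
  induction fuel with
  | zero => intro start pairs h1 h2; omega
  | succ fuel ih =>
    intro start pairs h1 h2
    rw [findPairsLoop]
    simp only [PySem.Str.findFrom_eq]
    by_cases hneg : PySem.Chars.findFrom word.toList num.toList (start : Int) = -1
    · rw [if_pos hneg]
      have hinf : ¬ num.toList <:+: word.toList.drop start :=
        (PySem.Chars.findFrom_natCast_eq_neg_one_iff word.toList num.toList start h1).mp hneg
      have hfil : (List.range' start (word.toList.length - start)).filter
          (fun i => PySem.Chars.startswith (word.toList.drop i) num.toList) = [] := by
        refine List.filter_eq_nil_iff.mpr ?_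
        intro i hi hsw
        have hmem := List.mem_range'_1.mp hi
        have hpre : num.toList <+: word.toList.drop i := (PySem.Chars.startswith_iff _ _).mp hsw
        have hdd : word.toList.drop i = (word.toList.drop start).drop (i - start) := by
          rw [List.drop_drop]; congr 1; omega
        rw [hdd] at hpre
        exact hinf (hpre.isInfix.trans (List.drop_suffix _ _).isInfix)
      rw [hfil]; simp
    · rw [if_neg hneg]
      obtain ⟨hge, hpre, hmin⟩ :=
        PySem.Chars.findFrom_natCast_spec word.toList num.toList start h1 hneg
      set r := PySem.Chars.findFrom word.toList num.toList (start : Int) with hr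
      have h0r : (0 : Int) ≤ r := le_trans (by exact_mod_cast Nat.zero_le start) hge
      have hrt : ((r.toNat : Int)) = r := Int.toNat_of_nonneg h0r
      have hst : start ≤ r.toNat := by omega
      have hdne : word.toList.drop r.toNat ≠ [] := by
        intro hnil
        rw [hnil] at hpre
        exact hnum (List.prefix_nil.mp hpre)
      have htn : r.toNat < word.toList.length := by
        rcases Nat.lt_or_ge r.toNat word.toList.length with h | h
        · exact h
        · exact absurd (List.drop_eq_nil_of_le h) hdne
      rw [ih (r.toNat + 1) (pairs ++ [(r, v)]) (by omega) (by omega)]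
      have hsplit : List.range' start (word.toList.length - start) =
          List.range' start (r.toNat - start) ++ List.range' r.toNat (word.toList.length - r.toNat) := by
        have := List.range'_append (s := start) (m := r.toNat - start)
          (n := word.toList.length - r.toNat) (step := 1)
        rw [show start + 1 * (r.toNat - start) = r.toNat from by omega] at this
        rw [show r.toNat - start + (word.toList.length - r.toNat) = word.toList.length - start
          from by omega] at this
        exact this.symm
      have hfil1 : (List.range' start (r.toNat - start)).filter
          (fun i => PySem.Chars.startswith (word.toList.drop i) num.toList) = [] := by
        refine List.filter_eq_nil_iff.mpr ?_
        intro i hi hsw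
        have hmem := List.mem_range'_1.mp hi
        exact hmin i (by omega) (by omega) ((PySem.Chars.startswith_iff _ _).mp hsw)
      have hcons : List.range' r.toNat (word.toList.length - r.toNat) =
          r.toNat :: List.range' (r.toNat + 1) (word.toList.length - (r.toNat + 1)) := by
        rw [show word.toList.length - r.toNat = (word.toList.length - (r.toNat + 1)) + 1
          from by omega, List.range'_succ]
      rw [hsplit, List.filter_append, hfil1, List.nil_append, hcons, List.filter_cons,
        if_pos (by exact (PySem.Chars.startswith_iff _ _).mpr hpre)]
      simp [hrt, List.append_assoc]

lemma enumerate_eq {α : Type} (xs : List α) (d : α) :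
    PySem.List.enumerate xs = (List.range xs.length).map (fun (k : Nat) => ((k : Int), xs.getD k d)) := by
  rw [PySem.List.enumerate_eq_map_pyRange xs d, PySem.List.pyRange_one]
  simp [PySem.List.len_eq, List.map_map, Function.comp_def]

lemma pairwise_of_length_le_one {α : Type} {R : α → α → Prop} {l : List α}
    (h : l.length ≤ 1) : l.Pairwise R := by
  match l with
  | [] => exact List.Pairwise.nil
  | [a] => exact List.pairwise_singleton R a
  | a :: b :: t => simp at h

lemma inner_a_eq (word : String) :
    (PySem.List.enumerate word.toList).foldl (fun wd ic =>
      let wd2 := (PySem.List.enumerate NUMS).foldl (fun acc jn =>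
        if PySem.Str.startswith (PySem.Str.slice word (some ic.1) none) jn.2
        then acc ++ [PySem.Int.toStr (jn.1 + 1)] else acc) wd
      if PySem.Chars.isdigit ic.2 then wd2 ++ [String.ofList [ic.2]] else wd2) []
    = (List.range word.toList.length).flatMap (valsAt word) := by
  rw [enumerate_eq word.toList default, List.foldl_map]
  rw [PySem.List.foldl_congr_mem (List.range word.toList.length) _
    (fun wd k => wd ++ valsAt word k) [] ?_]
  · rw [PySem.List.foldl_append_eq_flatMap]; simp
  · intro acc k hk
    simp only
    rw [PySem.List.foldl_append_if (fun jn =>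
        PySem.Str.startswith (PySem.Str.slice word (some ((k : Int))) none) jn.2)
      (fun jn => PySem.Int.toStr (jn.1 + 1)) (PySem.List.enumerate NUMS) acc]
    unfold valsAt
    have hsl : ∀ jn : Int × String,
        PySem.Str.startswith (PySem.Str.slice word (some ((k : Int))) none) jn.2 =
        PySem.Chars.startswith (word.toList.drop k) jn.2.toList := by
      intro jn
      rw [PySem.Str.startswith_eq, PySem.Str.toList_slice,
        show PySem.Chars.slice word.toList (some ((k : Int))) none = word.toList.drop k from
          PySem.List.slice_from_natCast _ _]
    simp only [hsl]
    split <;> simp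

lemma pairsC_pairwise (word : String) : (pairsC word).Pairwise (fun p q => p.1 < q.1) := by
  unfold pairsC
  rw [List.flatMap]
  refine List.pairwise_flatten.mpr ⟨?_, ?_⟩
  · intro l hl
    obtain ⟨i, hi, rfl⟩ := List.mem_map.mp hl
    exact pairwise_of_length_le_one
      (by simpa using valsAt_length word i)
  · refine List.pairwise_map.mpr ?_
    refine (List.pairwise_lt_range).imp ?_
    intro i j hij x hx y hy
    obtain ⟨vx, _, rfl⟩ := List.mem_map.mp hx
    obtain ⟨vy, _, rfl⟩ := List.mem_map.mp hy
    show ((i : Int)) < ((j : Int))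
    exact_mod_cast hij

lemma pairsC_perm (word : String) :
    (pairsC word).Perm
      ((PySem.List.enumerate word.toList).foldl (fun pairs ic =>
          if PySem.Chars.isdigit ic.2 then pairs ++ [(ic.1, String.ofList [ic.2])] else pairs)
        ((PySem.List.enumerate NUMS).foldl (fun pairs jn =>
          findPairsLoop word jn.2 (PySem.Int.toStr (jn.1 + 1)) (word.toList.length + 1) 0 pairs) [])) := by
  rw [PySem.List.foldl_congr_mem (PySem.List.enumerate NUMS) _
      (fun pairs jn => pairs ++ ((List.range word.toList.length).filter
        (fun i => PySem.Chars.startswith (word.toList.drop i) jn.2.toList)).map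
        (fun (i : Nat) => ((i : Int), PySem.Int.toStr (jn.1 + 1)))) [] ?_]
  swap
  · intro pairs jn hmem
    rw [findPairsLoop_spec word jn.2 (PySem.Int.toStr (jn.1 + 1)) (nums_ne_nil jn hmem)
      (word.toList.length + 1) 0 pairs (Nat.zero_le _) (by omega)]
    rw [Nat.sub_zero, ← List.range_eq_range']
  rw [PySem.List.foldl_append_eq_flatMap, List.nil_append]
  rw [PySem.List.foldl_append_if (fun ic => PySem.Chars.isdigit ic.2)
      (fun ic => (ic.1, String.ofList [ic.2])) (PySem.List.enumerate word.toList) _]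
  have hD : ((PySem.List.enumerate word.toList).filter
        (fun ic => PySem.Chars.isdigit ic.2)).map (fun ic => (ic.1, String.ofList [ic.2]))
      = ((List.range word.toList.length).filter
          (fun k => PySem.Chars.isdigit (word.toList.getD k default))).map
        (fun (k : Nat) => ((k : Int), String.ofList [word.toList.getD k default])) := by
    rw [enumerate_eq word.toList default, List.filter_map, List.map_map]
    simp [Function.comp_def]
  rw [hD]
  unfold pairsC valsAt
  have hvsplit : (fun (i : Nat) => (((PySem.List.enumerate NUMS).filter (fun jn =>
          PySem.Chars.startswith (word.toList.drop i) jn.2.toList)).map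
          (fun jn => PySem.Int.toStr (jn.1 + 1)) ++
        (if PySem.Chars.isdigit (word.toList.getD i default)
         then [String.ofList [word.toList.getD i default]] else [])).map
        (fun v => ((i : Int), v)))
      = fun (i : Nat) =>
        ((PySem.List.enumerate NUMS).flatMap (fun jn =>
          if PySem.Chars.startswith (word.toList.drop i) jn.2.toList
          then [((i : Int), PySem.Int.toStr (jn.1 + 1))] else [])) ++
        (if PySem.Chars.isdigit (word.toList.getD i default)
         then [((i : Int), String.ofList [word.toList.getD i default])] else []) := by
    funext i
    rw [List.map_append, flatMap_ite_eq_map_filter, List.map_map]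
    congr 1
    split <;> simp
  rw [hvsplit]
  refine (perm_flatMap_append (List.range word.toList.length) _ _).trans ?_
  refine List.Perm.append ?_ ?_
  · refine (flatMap_comm_perm (List.range word.toList.length) (PySem.List.enumerate NUMS)
      (fun i jn => if PySem.Chars.startswith (word.toList.drop i) jn.2.toList
        then [((i : Int), PySem.Int.toStr (jn.1 + 1))] else [])).trans ?_
    refine List.Perm.of_eq ?_
    have h2 : (fun (jn : Int × String) => (List.range word.toList.length).flatMap
          (fun i => if PySem.Chars.startswith (word.toList.drop i) jn.2.toList
            then [((i : Int), PySem.Int.toStr (jn.1 + 1))] else []))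
        = fun (jn : Int × String) => ((List.range word.toList.length).filter
            (fun i => PySem.Chars.startswith (word.toList.drop i) jn.2.toList)).map
            (fun (i : Nat) => ((i : Int), PySem.Int.toStr (jn.1 + 1))) :=
      funext fun jn => flatMap_ite_eq_map_filter _ _ _
    rw [h2]
  · refine List.Perm.of_eq ?_
    rw [flatMap_ite_eq_map_filter]

lemma word_eq (word : String) :
    (PySem.List.enumerate word.toList).foldl (fun wd ic =>
      let wd2 := (PySem.List.enumerate NUMS).foldl (fun acc jn =>
        if PySem.Str.startswith (PySem.Str.slice word (some ic.1) none) jn.2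
        then acc ++ [PySem.Int.toStr (jn.1 + 1)] else acc) wd
      if PySem.Chars.isdigit ic.2 then wd2 ++ [String.ofList [ic.2]] else wd2) []
    = (PySem.List.sorted
        ((PySem.List.enumerate word.toList).foldl (fun pairs ic =>
            if PySem.Chars.isdigit ic.2 then pairs ++ [(ic.1, String.ofList [ic.2])] else pairs)
          ((PySem.List.enumerate NUMS).foldl (fun pairs jn =>
            findPairsLoop word jn.2 (PySem.Int.toStr (jn.1 + 1)) (word.toList.length + 1) 0 pairs) []))
        (fun p => p.1)).map (fun p => p.2) := by
  rw [PySem.List.sorted_eq_of_perm_of_pairwise_lt _ (pairsC word) _ (pairsC_perm word) (pairsC_pairwise word)]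
  rw [inner_a_eq]
  simp [pairsC, List.map_flatMap, List.map_map, Function.comp_def]

-- ===== VERDICT (by name: the statement is the Claim_ definition above) =====
theorem digits_with_cursive_spec : Claim_equal_digits_with_cursive := by
  intro words _
  unfold Spec_digits_with_cursive digits_with_cursive digits_with_cursive_alt
  apply PySem.List.foldl_congr_mem
  intro acc word _
  simp only [word_eq word]
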